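-- pv_equiv track=rewrite | github.com/ZaBrisket/NDA-Redline-Tool | backend/app/core/reasonableness_scorer.py | _score_categorical_provision
-- ===== SOURCE A (Python) =====
-- from typing import Dict, Any, Tuple, Optional
--
-- def _score_categorical_provision(value: str, thresholds: Dict) -> int:
--     """Score categorical provisions like geographic scope"""
--
--     value_lower = value.lower()
--
--     # Check ideal
--     if 'ideal' in thresholds:
--         if any(ideal.lower() in value_lower for ideal in thresholds['ideal']):
--             return 100
--
--     # Check acceptable
--     if 'acceptable' in thresholds:
--         if any(acc.lower() in value_lower for acc in thresholds['acceptable']):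
--             return 75
--
--     # Check questionable
--     if 'questionable' in thresholds:
--         if any(q.lower() in value_lower for q in thresholds['questionable']):
--             return 50
--
--     # Check unreasonable
--     if 'unreasonable' in thresholds:
--         if any(unr.lower() in value_lower for unr in thresholds['unreasonable']):
--             return 25
--
--     return 50  # default
-- ===== SOURCE B (Python) =====
-- def _score_categorical_provision(value: str, thresholds) -> int:
--     """Score categorical provisions like geographic scope"""
--     value_lower = value.lower()
--     score_of = {'ideal': 100, 'acceptable': 75, 'questionable': 50, 'unreasonable': 25}
--     best = 50
--     matched = False
--     for cat, terms in thresholds.items():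
--         score = score_of.get(cat)
--         if score is not None and any(t.lower() in value_lower for t in terms):
--             if not matched or score > best:
--                 best = score
--                 matched = True
--     return best
-- ===== Notes on version B (the rewrite author's own statement) =====
-- stated objective: alternative
-- what changed: B makes a single pass over the dict's own items with a (best, matched) accumulator, scoring each entry via a key->score table, instead of A's four staged fixed-key membership checks with early returns; Pre_ excludes association lists with duplicate keys, which do not represent any Python dict.
import Mathlib
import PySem

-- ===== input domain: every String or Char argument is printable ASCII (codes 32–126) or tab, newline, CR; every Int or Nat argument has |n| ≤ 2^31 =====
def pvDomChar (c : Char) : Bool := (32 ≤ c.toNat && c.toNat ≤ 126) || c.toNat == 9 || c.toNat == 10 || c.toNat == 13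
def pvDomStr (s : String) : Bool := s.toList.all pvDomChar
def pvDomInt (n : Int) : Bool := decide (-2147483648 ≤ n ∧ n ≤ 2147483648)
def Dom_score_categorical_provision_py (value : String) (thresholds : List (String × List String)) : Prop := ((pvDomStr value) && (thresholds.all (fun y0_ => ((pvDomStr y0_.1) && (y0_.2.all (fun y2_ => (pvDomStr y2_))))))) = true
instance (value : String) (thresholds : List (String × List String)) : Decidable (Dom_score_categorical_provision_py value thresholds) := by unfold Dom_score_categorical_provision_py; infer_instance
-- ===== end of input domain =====

-- B replaces A's four staged fixed-key checks (early return per category) by a single pass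
-- over the dict's items with a (best, matched) accumulator and a key->score lookup table.

-- ===== PORT A =====
-- 'key' in thresholds and any(t.lower() in value_lower for t in thresholds[key])
def pvHitA (value_lower : String) (thresholds : List (String × List String)) (key : String) : Bool :=
  PySem.Dict.contains (PySem.Dict.mk thresholds) key &&
    (PySem.Dict.getD (PySem.Dict.mk thresholds) key []).any (fun t => PySem.Str.isIn (PySem.Str.lower t) value_lower)

def score_categorical_provision_py (value : String) (thresholds : List (String × List String)) : Int :=
  let value_lower := PySem.Str.lower value
  if pvHitA value_lower thresholds "ideal" then 100
  else if pvHitA value_lower thresholds "acceptable" then 75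
  else if pvHitA value_lower thresholds "questionable" then 50
  else if pvHitA value_lower thresholds "unreasonable" then 25
  else 50

-- ===== PORT B =====
-- score_of = {'ideal': 100, 'acceptable': 75, 'questionable': 50, 'unreasonable': 25}
def pvScoreOf : PySem.Dict String Int :=
  PySem.Dict.mk [("ideal", 100), ("acceptable", 75), ("questionable", 50), ("unreasonable", 25)]

-- loop body: score = score_of.get(cat); if score is not None and any(...): if not matched or score > best: best, matched = score, True
def pvStepB (value_lower : String) (st : Int × Bool) (p : String × List String) : Int × Bool :=
  match PySem.Dict.get? pvScoreOf p.1 with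
  | none => st
  | some score =>
    if p.2.any (fun t => PySem.Str.isIn (PySem.Str.lower t) value_lower) then
      if !st.2 || score > st.1 then (score, true) else st
    else st

def score_categorical_provision_py_alt (value : String) (thresholds : List (String × List String)) : Int :=
  let value_lower := PySem.Str.lower value
  (thresholds.foldl (pvStepB value_lower) (50, false)).1

-- ===== PRECONDITION & SPEC =====
-- Pre_ excludes association lists with duplicate keys: a Python dict cannot have them, so they
-- represent no input of the original program (A's first-match dict lookup vs B's full scan is
-- accidental there).
def Pre_score_categorical_provision_py (value : String) (thresholds : List (String × List String)) : Prop :=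
  (thresholds.map Prod.fst).Nodup
instance (value : String) (thresholds : List (String × List String)) : Decidable (Pre_score_categorical_provision_py value thresholds) := by unfold Pre_score_categorical_provision_py; infer_instance

def pvWitness_score_categorical_provision_py : String × (List (String × List String)) :=
  ("worldwide scope", [("ideal", ["state"]), ("acceptable", ["worldwide"])])

def Spec_score_categorical_provision_py (value : String) (thresholds : List (String × List String)) (out : Int) : Prop := out = score_categorical_provision_py_alt value thresholds
instance (value : String) (thresholds : List (String × List String)) (out : Int) : Decidable (Spec_score_categorical_provision_py value thresholds out) := by unfold Spec_score_categorical_provision_py; infer_instance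

-- ===== CLAIM (what is proved, stated in full; the proofs are below) =====
def Claim_equal_score_categorical_provision_py : Prop := ∀ (value : String) (thresholds : List (String × List String)), Dom_score_categorical_provision_py value thresholds → Pre_score_categorical_provision_py value thresholds → Spec_score_categorical_provision_py value thresholds (score_categorical_provision_py value thresholds)

-- ===== LEMMAS AND PROOFS =====

-- does any entry of l with key k match?
def pvQ (vl : String) (l : List (String × List String)) (k : String) : Bool :=
  l.any (fun p => p.1 == k && p.2.any (fun t => PySem.Str.isIn (PySem.Str.lower t) vl))

-- the best score among matching categories, none if no category matches
def pvBest4 (i a q u : Bool) : Option Int :=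
  if i then some 100 else if a then some 75 else if q then some 50 else if u then some 25 else none

theorem pvQ_nil (vl : String) (k : String) : pvQ vl [] k = false := rfl

theorem pvQ_cons (vl : String) (p : String × List String) (l : List (String × List String)) (k : String) :
    pvQ vl (p :: l) k =
      ((p.1 == k && p.2.any (fun t => PySem.Str.isIn (PySem.Str.lower t) vl)) || pvQ vl l k) := by
  simp [pvQ]

theorem pvScoreOf_get? (k : String) :
    PySem.Dict.get? pvScoreOf k =
      if k = "ideal" then some 100 else if k = "acceptable" then some 75
      else if k = "questionable" then some 50 else if k = "unreasonable" then some 25 else none := by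
  by_cases h1 : k = "ideal"
  · subst h1; decide
  by_cases h2 : k = "acceptable"
  · subst h2; decide
  by_cases h3 : k = "questionable"
  · subst h3; decide
  by_cases h4 : k = "unreasonable"
  · subst h4; decide
  rw [if_neg h1, if_neg h2, if_neg h3, if_neg h4]
  show PySem.Dict.get? (PySem.Dict.mk _) k = none
  rw [PySem.Dict.get?_mk_cons, if_neg (by simp [Ne.symm h1]),
      PySem.Dict.get?_mk_cons, if_neg (by simp [Ne.symm h2]),
      PySem.Dict.get?_mk_cons, if_neg (by simp [Ne.symm h3]),
      PySem.Dict.get?_mk_cons, if_neg (by simp [Ne.symm h4])]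
  rfl

theorem pvFoldB (vl : String) (l : List (String × List String)) (b : Int) (m : Bool) :
    l.foldl (pvStepB vl) (b, m) =
      match pvBest4 (pvQ vl l "ideal") (pvQ vl l "acceptable")
            (pvQ vl l "questionable") (pvQ vl l "unreasonable") with
      | none => (b, m)
      | some s => ((if m then max b s else s), true) := by
  induction l generalizing b m with
  | nil => simp [pvQ_nil, pvBest4]
  | cons p l ih =>
    obtain ⟨pk, pv⟩ := p
    rw [List.foldl_cons]
    simp only [pvQ_cons]
    rw [show pvStepB vl (b, m) (pk, pv) =
        (match PySem.Dict.get? pvScoreOf pk with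
         | none => (b, m)
         | some score =>
           if pv.any (fun t => PySem.Str.isIn (PySem.Str.lower t) vl) then
             if !m || score > b then (score, true) else (b, m)
           else (b, m)) from rfl]
    rw [pvScoreOf_get?]
    by_cases hideal : pk = "ideal"
    · subst hideal
      rw [show (if ("ideal" : String) = "ideal" then some (100 : Int)
            else if ("ideal" : String) = "acceptable" then some 75
            else if ("ideal" : String) = "questionable" then some 50
            else if ("ideal" : String) = "unreasonable" then some 25 else none) = some (100 : Int) from by decide]
      cases hA : pv.any (fun t => PySem.Str.isIn (PySem.Str.lower t) vl) with
      | false =>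
        rw [show (match some (100 : Int) with
              | none => (b, m)
              | some score =>
                if false = true then
                  if !m || score > b then (score, true) else (b, m)
                else (b, m)) = (b, m) from rfl]
        rw [ih b m]
        simp [hA]
      | true =>
        rw [show (match some (100 : Int) with
              | none => (b, m)
              | some score =>
                if true = true then
                  if !m || score > b then (score, true) else (b, m)
                else (b, m)) = (if !m || (100 : Int) > b then ((100 : Int), true) else (b, m)) from rfl]
        cases m with
        | false =>
          rw [if_pos (by simp : (!false || decide ((100 : Int) > b)) = true)]
          rw [ih (100 : Int) true]
          rcases hI : pvQ vl l "ideal" <;> rcases hA2 : pvQ vl l "acceptable" <;>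
          rcases hQ : pvQ vl l "questionable" <;> rcases hU : pvQ vl l "unreasonable" <;>
            simp [hA, hI, hA2, hQ, hU, pvBest4, max_def]
        | true =>
          by_cases hb : ((100 : Int) > b)
          · rw [if_pos (by simp [hb] : (!true || decide ((100 : Int) > b)) = true)]
            rw [ih (100 : Int) true]
            rcases hI : pvQ vl l "ideal" <;> rcases hA2 : pvQ vl l "acceptable" <;>
            rcases hQ : pvQ vl l "questionable" <;> rcases hU : pvQ vl l "unreasonable" <;>
              simp [hA, hI, hA2, hQ, hU, pvBest4, max_def] <;> omega
          · rw [if_neg (by simp [hb] : ¬ (!true || decide ((100 : Int) > b)) = true)]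
            rw [ih b true]
            rcases hI : pvQ vl l "ideal" <;> rcases hA2 : pvQ vl l "acceptable" <;>
            rcases hQ : pvQ vl l "questionable" <;> rcases hU : pvQ vl l "unreasonable" <;>
              simp [hA, hI, hA2, hQ, hU, pvBest4, max_def] <;> omega
    by_cases hacceptable : pk = "acceptable"
    · subst hacceptable
      rw [show (if ("acceptable" : String) = "ideal" then some (100 : Int)
            else if ("acceptable" : String) = "acceptable" then some 75
            else if ("acceptable" : String) = "questionable" then some 50
            else if ("acceptable" : String) = "unreasonable" then some 25 else none) = some (75 : Int) from by decide]
      cases hA : pv.any (fun t => PySem.Str.isIn (PySem.Str.lower t) vl) with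
      | false =>
        rw [show (match some (75 : Int) with
              | none => (b, m)
              | some score =>
                if false = true then
                  if !m || score > b then (score, true) else (b, m)
                else (b, m)) = (b, m) from rfl]
        rw [ih b m]
        simp [hA]
      | true =>
        rw [show (match some (75 : Int) with
              | none => (b, m)
              | some score =>
                if true = true then
                  if !m || score > b then (score, true) else (b, m)
                else (b, m)) = (if !m || (75 : Int) > b then ((75 : Int), true) else (b, m)) from rfl]
        cases m with
        | false =>
          rw [if_pos (by simp : (!false || decide ((75 : Int) > b)) = true)]
          rw [ih (75 : Int) true]
          rcases hI : pvQ vl l "ideal" <;> rcases hA2 : pvQ vl l "acceptable" <;>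
          rcases hQ : pvQ vl l "questionable" <;> rcases hU : pvQ vl l "unreasonable" <;>
            simp [hA, hI, hA2, hQ, hU, pvBest4, max_def]
        | true =>
          by_cases hb : ((75 : Int) > b)
          · rw [if_pos (by simp [hb] : (!true || decide ((75 : Int) > b)) = true)]
            rw [ih (75 : Int) true]
            rcases hI : pvQ vl l "ideal" <;> rcases hA2 : pvQ vl l "acceptable" <;>
            rcases hQ : pvQ vl l "questionable" <;> rcases hU : pvQ vl l "unreasonable" <;>
              simp [hA, hI, hA2, hQ, hU, pvBest4, max_def] <;> omega
          · rw [if_neg (by simp [hb] : ¬ (!true || decide ((75 : Int) > b)) = true)]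
            rw [ih b true]
            rcases hI : pvQ vl l "ideal" <;> rcases hA2 : pvQ vl l "acceptable" <;>
            rcases hQ : pvQ vl l "questionable" <;> rcases hU : pvQ vl l "unreasonable" <;>
              simp [hA, hI, hA2, hQ, hU, pvBest4, max_def] <;> omega
    by_cases hquestionable : pk = "questionable"
    · subst hquestionable
      rw [show (if ("questionable" : String) = "ideal" then some (100 : Int)
            else if ("questionable" : String) = "acceptable" then some 75
            else if ("questionable" : String) = "questionable" then some 50
            else if ("questionable" : String) = "unreasonable" then some 25 else none) = some (50 : Int) from by decide]
      cases hA : pv.any (fun t => PySem.Str.isIn (PySem.Str.lower t) vl) with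
      | false =>
        rw [show (match some (50 : Int) with
              | none => (b, m)
              | some score =>
                if false = true then
                  if !m || score > b then (score, true) else (b, m)
                else (b, m)) = (b, m) from rfl]
        rw [ih b m]
        simp [hA]
      | true =>
        rw [show (match some (50 : Int) with
              | none => (b, m)
              | some score =>
                if true = true then
                  if !m || score > b then (score, true) else (b, m)
                else (b, m)) = (if !m || (50 : Int) > b then ((50 : Int), true) else (b, m)) from rfl]
        cases m with
        | false =>
          rw [if_pos (by simp : (!false || decide ((50 : Int) > b)) = true)]
          rw [ih (50 : Int) true]
          rcases hI : pvQ vl l "ideal" <;> rcases hA2 : pvQ vl l "acceptable" <;>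
          rcases hQ : pvQ vl l "questionable" <;> rcases hU : pvQ vl l "unreasonable" <;>
            simp [hA, hI, hA2, hQ, hU, pvBest4, max_def]
        | true =>
          by_cases hb : ((50 : Int) > b)
          · rw [if_pos (by simp [hb] : (!true || decide ((50 : Int) > b)) = true)]
            rw [ih (50 : Int) true]
            rcases hI : pvQ vl l "ideal" <;> rcases hA2 : pvQ vl l "acceptable" <;>
            rcases hQ : pvQ vl l "questionable" <;> rcases hU : pvQ vl l "unreasonable" <;>
              simp [hA, hI, hA2, hQ, hU, pvBest4, max_def] <;> omega
          · rw [if_neg (by simp [hb] : ¬ (!true || decide ((50 : Int) > b)) = true)]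
            rw [ih b true]
            rcases hI : pvQ vl l "ideal" <;> rcases hA2 : pvQ vl l "acceptable" <;>
            rcases hQ : pvQ vl l "questionable" <;> rcases hU : pvQ vl l "unreasonable" <;>
              simp [hA, hI, hA2, hQ, hU, pvBest4, max_def] <;> omega
    by_cases hunreasonable : pk = "unreasonable"
    · subst hunreasonable
      rw [show (if ("unreasonable" : String) = "ideal" then some (100 : Int)
            else if ("unreasonable" : String) = "acceptable" then some 75
            else if ("unreasonable" : String) = "questionable" then some 50
            else if ("unreasonable" : String) = "unreasonable" then some 25 else none) = some (25 : Int) from by decide]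
      cases hA : pv.any (fun t => PySem.Str.isIn (PySem.Str.lower t) vl) with
      | false =>
        rw [show (match some (25 : Int) with
              | none => (b, m)
              | some score =>
                if false = true then
                  if !m || score > b then (score, true) else (b, m)
                else (b, m)) = (b, m) from rfl]
        rw [ih b m]
        simp [hA]
      | true =>
        rw [show (match some (25 : Int) with
              | none => (b, m)
              | some score =>
                if true = true then
                  if !m || score > b then (score, true) else (b, m)
                else (b, m)) = (if !m || (25 : Int) > b then ((25 : Int), true) else (b, m)) from rfl]
        cases m with
        | false =>
          rw [if_pos (by simp : (!false || decide ((25 : Int) > b)) = true)]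
          rw [ih (25 : Int) true]
          rcases hI : pvQ vl l "ideal" <;> rcases hA2 : pvQ vl l "acceptable" <;>
          rcases hQ : pvQ vl l "questionable" <;> rcases hU : pvQ vl l "unreasonable" <;>
            simp [hA, hI, hA2, hQ, hU, pvBest4, max_def]
        | true =>
          by_cases hb : ((25 : Int) > b)
          · rw [if_pos (by simp [hb] : (!true || decide ((25 : Int) > b)) = true)]
            rw [ih (25 : Int) true]
            rcases hI : pvQ vl l "ideal" <;> rcases hA2 : pvQ vl l "acceptable" <;>
            rcases hQ : pvQ vl l "questionable" <;> rcases hU : pvQ vl l "unreasonable" <;>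
              simp [hA, hI, hA2, hQ, hU, pvBest4, max_def] <;> omega
          · rw [if_neg (by simp [hb] : ¬ (!true || decide ((25 : Int) > b)) = true)]
            rw [ih b true]
            rcases hI : pvQ vl l "ideal" <;> rcases hA2 : pvQ vl l "acceptable" <;>
            rcases hQ : pvQ vl l "questionable" <;> rcases hU : pvQ vl l "unreasonable" <;>
              simp [hA, hI, hA2, hQ, hU, pvBest4, max_def] <;> omega
    rw [if_neg hideal, if_neg hacceptable, if_neg hquestionable, if_neg hunreasonable]
    have e1 : (pk == "ideal") = false := by simp [hideal]
    have e2 : (pk == "acceptable") = false := by simp [hacceptable]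
    have e3 : (pk == "questionable") = false := by simp [hquestionable]
    have e4 : (pk == "unreasonable") = false := by simp [hunreasonable]
    simp only [e1, e2, e3, e4, Bool.false_and, Bool.false_or]
    exact ih b m

theorem pvDictContains_cons (p : String × List String) (l : List (String × List String)) (k : String) :
    PySem.Dict.contains (PySem.Dict.mk (p :: l)) k = (p.1 == k || PySem.Dict.contains (PySem.Dict.mk l) k) := by
  simp [PySem.Dict.contains_mk]

theorem pvDictGetD_cons (p : String × List String) (l : List (String × List String)) (k : String) :
    PySem.Dict.getD (PySem.Dict.mk (p :: l)) k [] =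
      if p.1 == k then p.2 else PySem.Dict.getD (PySem.Dict.mk l) k [] := by
  rw [PySem.Dict.getD_eq_get?_getD, PySem.Dict.get?_mk_cons, PySem.Dict.getD_eq_get?_getD]
  split <;> rfl

theorem pvQ_false_of_not_mem (vl : String) (l : List (String × List String)) (k : String)
    (h : k ∉ l.map Prod.fst) : pvQ vl l k = false := by
  simp only [pvQ, List.any_eq_false]
  intro p hp
  simp only [Bool.and_eq_true, beq_iff_eq, not_and]
  intro hk _
  exact h (List.mem_map.mpr ⟨p, hp, hk⟩)

theorem pvHit_eq (vl : String) (l : List (String × List String)) (k : String)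
    (h : (l.map Prod.fst).Nodup) :
    pvHitA vl l k = pvQ vl l k := by
  induction l with
  | nil => simp [pvHitA, pvQ, PySem.Dict.contains_mk]
  | cons p l ih =>
    rw [List.map_cons, List.nodup_cons] at h
    rw [pvQ_cons]
    unfold pvHitA
    rw [pvDictContains_cons, pvDictGetD_cons]
    by_cases hk : p.1 = k
    · subst hk
      have hq : pvQ vl l p.1 = false := pvQ_false_of_not_mem vl l p.1 h.1
      simp [hq]
    · have hk' : (p.1 == k) = false := by simp [hk]
      simp only [hk', Bool.false_or, Bool.false_and, if_neg (by simp [hk] : ¬ (p.1 == k) = true)]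
      exact ih h.2

-- ===== VERDICT (by name: the statement is the Claim_ definition above) =====
theorem score_categorical_provision_py_spec : Claim_equal_score_categorical_provision_py := by
  intro value thresholds _ hpre
  unfold Spec_score_categorical_provision_py
  unfold score_categorical_provision_py score_categorical_provision_py_alt
  simp only [pvFoldB, pvHit_eq _ _ _ hpre]
  rcases hI : pvQ (PySem.Str.lower value) thresholds "ideal" <;>
  rcases hA : pvQ (PySem.Str.lower value) thresholds "acceptable" <;>
  rcases hQ : pvQ (PySem.Str.lower value) thresholds "questionable" <;>
  rcases hU : pvQ (PySem.Str.lower value) thresholds "unreasonable" <;>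
    simp [pvBest4]
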